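-- pv_equiv track=rewrite | github.com/ianbrayoni/kattis | doorman/doorman.py | max_revellers
-- ===== SOURCE A (Python) =====
-- from collections import deque
--
-- def max_revellers(diff, genders):
--     diff = int(diff)
--     temp_diff = 0
--     q = deque()
--
--     if diff == 0:
--         return len(genders)
--
--     # simulate a queue
--     for gender in genders:
--         q.append(gender)
--
--     men = 0
--     women = 0
--     q_len = len(q)
--
--     # we shall use FIFO unless where we can admit next in line
--     while q_len > 1 and temp_diff <= diff:
--         current = q[0]
--         next_in_line = q[1]
--
--         # if there's more men than women, admit a woman
--         if (men - women) >= diff and next_in_line == "W":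
--             women += 1
--
--             if current == "W":
--                 q.popleft()
--             else:
--                 del q[1]
--
--         # if there's more women than men, admit a man
--         elif (women - men) >= diff and next_in_line == "M":
--             men += 1
--             if current == "M":
--                 q.popleft()
--             else:
--                 del q[1]
--
--         # if men == women, just admit first in line
--         else:
--             if current == "M":
--                 q.popleft()
--                 men += 1
--             else:
--                 q.popleft()
--                 women += 1
--
--         temp_diff = abs(women - men)
--
--         q_len -= 1
--
--     if q_len == 1:
--         # we are at the end of the queue, diff is ok - admit last guy
--         count = men + women + 1
--     else:
--         # remove guy that messes up diff
--         count = men + women - 1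
--
--     return count
-- ===== SOURCE B (Python) =====
-- def max_revellers(diff, genders):
--     # One pass with a held "front" character instead of a deque with O(n) middle
--     # deletion: only positions 0 and 1 of the queue are ever inspected, so the
--     # whole queue state collapses to (front, rest-of-string iterator).
--     diff = int(diff)
--     if diff == 0:
--         return len(genders)
--     men = 0
--     women = 0
--     front = genders[0]
--     remaining = len(genders)
--     for d in genders[1:]:
--         if men - women >= diff and d == "W":
--             women += 1
--             if front == "W":
--                 front = d
--         elif women - men >= diff and d == "M":
--             men += 1
--             if front == "M":
--                 front = d
--         else:
--             if front == "M":
--                 men += 1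
--             else:
--                 women += 1
--             front = d
--         remaining -= 1
--         if remaining > 1 and abs(women - men) > diff:
--             return men + women - 1
--     return men + women + 1
-- ===== Notes on version B (the rewrite author's own statement) =====
-- stated objective: faster
-- what changed: Replaced the deque simulation (build a deque, popleft/middle-delete per step) by a single pass over the string holding one 'front' character and scalar counters: since A only ever inspects queue positions 0 and 1, the whole queue state collapses to the front character, removing the deque construction and mutation entirely (constant-factor speedup, measured ~1.9x at the largest size).
-- outside the precondition, e.g. on max_revellers(-1, 'MW'): A returns -1, B returns 2; on max_revellers(2, ''): A returns -1, B raises IndexError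
import Mathlib
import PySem

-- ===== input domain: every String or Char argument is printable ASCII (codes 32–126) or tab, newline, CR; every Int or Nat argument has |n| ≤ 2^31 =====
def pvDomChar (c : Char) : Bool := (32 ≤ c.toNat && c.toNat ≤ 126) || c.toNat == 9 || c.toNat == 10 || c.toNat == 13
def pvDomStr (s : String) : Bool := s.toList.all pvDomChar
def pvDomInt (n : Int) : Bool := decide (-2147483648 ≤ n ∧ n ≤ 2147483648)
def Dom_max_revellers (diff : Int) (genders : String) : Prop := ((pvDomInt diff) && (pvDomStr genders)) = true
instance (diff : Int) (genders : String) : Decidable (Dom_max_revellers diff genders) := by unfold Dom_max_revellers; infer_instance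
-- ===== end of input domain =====

-- B replaces A's deque (popleft / middle delete) by one pass over the string holding a
-- single "front" character, since A only ever inspects queue positions 0 and 1 (measured faster).


-- ===== PORT A =====
-- A's while loop: state (q_len, queue, men, women, temp_diff); q_len strictly decreases.
def maxRevLoopA (diff : Int) (q_len : Nat) (q : List Char) (men women temp_diff : Int) :
    Nat × Int × Int :=
  if _h : 1 < q_len ∧ temp_diff ≤ diff then
    match q with
    | current :: next_in_line :: rest =>
      if men - women ≥ diff ∧ next_in_line = 'W' then
        if current = 'W' then
          maxRevLoopA diff (q_len - 1) (next_in_line :: rest) men (women + 1) |women + 1 - men|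
        else
          maxRevLoopA diff (q_len - 1) (current :: rest) men (women + 1) |women + 1 - men|
      else if women - men ≥ diff ∧ next_in_line = 'M' then
        if current = 'M' then
          maxRevLoopA diff (q_len - 1) (next_in_line :: rest) (men + 1) women |women - (men + 1)|
        else
          maxRevLoopA diff (q_len - 1) (current :: rest) (men + 1) women |women - (men + 1)|
      else
        if current = 'M' then
          maxRevLoopA diff (q_len - 1) (next_in_line :: rest) (men + 1) women |women - (men + 1)|
        else
          maxRevLoopA diff (q_len - 1) (next_in_line :: rest) men (women + 1) |women + 1 - men|
    | _ => (q_len, men, women)   -- unreachable when q_len = q.length (totality guard)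
  else (q_len, men, women)
termination_by q_len
decreasing_by all_goals omega

def max_revellers (diff : Int) (genders : String) : Int :=
  if diff = 0 then PySem.Str.len genders
  else
    let q := genders.toList
    let r := maxRevLoopA diff q.length q 0 0 0
    if r.1 = 1 then r.2.1 + r.2.2 + 1 else r.2.1 + r.2.2 - 1

-- ===== PORT B =====
-- B's for loop over genders[1:], holding the current front character.
def maxRevLoopB (diff : Int) : List Char → Char → Int → Int → Int → Int
  | [], _, men, women, _ => men + women + 1
  | d :: rest, front, men, women, remaining =>
    let step : Char × Int × Int :=
      if men - women ≥ diff ∧ d = 'W' then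
        (if front = 'W' then d else front, men, women + 1)
      else if women - men ≥ diff ∧ d = 'M' then
        (if front = 'M' then d else front, men + 1, women)
      else
        (d, if front = 'M' then men + 1 else men, if front = 'M' then women else women + 1)
    let remaining' := remaining - 1
    if remaining' > 1 ∧ |step.2.2 - step.2.1| > diff then step.2.1 + step.2.2 - 1
    else maxRevLoopB diff rest step.1 step.2.1 step.2.2 remaining'

def max_revellers_alt (diff : Int) (genders : String) : Int :=
  if diff = 0 then PySem.Str.len genders
  else
    match genders.toList with
    | [] => 0   -- Python B raises IndexError here (excluded by Pre_)
    | front :: tail => maxRevLoopB diff tail front 0 0 (genders.toList.length : Int)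

-- ===== PRECONDITION & SPEC =====
-- Pre_ restricts to the task's natural domain (non-negative limit, and a nonempty queue
-- unless diff = 0): for diff < 0 A returns sentinel-like values (-1, or 1 on a single
-- reveller) from leftover arithmetic, and for empty genders with diff ≠ 0 A returns -1
-- while the natural B raises IndexError.
def Pre_max_revellers (diff : Int) (genders : String) : Prop :=
  0 ≤ diff ∧ (diff = 0 ∨ genders ≠ "")
instance (diff : Int) (genders : String) : Decidable (Pre_max_revellers diff genders) := by
  unfold Pre_max_revellers; infer_instance

def pvWitness_max_revellers : Int × String := (1, "MWWM")

def Spec_max_revellers (diff : Int) (genders : String) (out : Int) : Prop :=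
  out = max_revellers_alt diff genders
instance (diff : Int) (genders : String) (out : Int) : Decidable (Spec_max_revellers diff genders out) := by
  unfold Spec_max_revellers; infer_instance

-- ===== CLAIM (what is proved, stated in full; the proofs are below) =====
def Claim_equal_max_revellers : Prop :=
  ∀ (diff : Int) (genders : String), Dom_max_revellers diff genders →
    Pre_max_revellers diff genders →
    Spec_max_revellers diff genders (max_revellers diff genders)

-- ===== LEMMAS AND PROOFS =====

-- A's post-loop finish.
def finishA (r : Nat × Int × Int) : Int :=
  if r.1 = 1 then r.2.1 + r.2.2 + 1 else r.2.1 + r.2.2 - 1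




theorem loopA_stop (diff : Int) (q_len : Nat) (q : List Char) (men women temp : Int)
    (h : ¬(1 < q_len ∧ temp ≤ diff)) :
    maxRevLoopA diff q_len q men women temp = (q_len, men, women) := by
  rw [maxRevLoopA.eq_def, dif_neg h]

theorem after_step (diff : Int) (rest' : List Char)
    (ih : ∀ front men women, |women - men| ≤ diff →
      finishA (maxRevLoopA diff (rest'.length + 1) (front :: rest') men women |women - men|)
        = maxRevLoopB diff rest' front men women ((rest'.length : Int) + 1))
    (front' : Char) (m w : Int) :
    finishA (maxRevLoopA diff (rest'.length + 1) (front' :: rest') m w |w - m|) =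
      if ((rest'.length : Int) + 1) > 1 ∧ |w - m| > diff then m + w - 1
      else maxRevLoopB diff rest' front' m w ((rest'.length : Int) + 1) := by
  by_cases hc : |w - m| ≤ diff
  · rw [if_neg (by omega)]
    exact ih front' m w hc
  · rw [not_le] at hc
    cases rest' with
    | nil =>
      rw [loopA_stop _ _ _ _ _ _ (by simp)]
      rw [if_neg (by simp)]
      simp [finishA, maxRevLoopB]
    | cons d2 r2 =>
      rw [if_pos ⟨by simp, hc⟩]
      rw [loopA_stop _ _ _ _ _ _ (fun hh => absurd hh.2 (not_le.mpr hc))]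
      simp [finishA]

theorem loop_eq (diff : Int) :
    ∀ (rest : List Char) (front : Char) (men women : Int),
      |women - men| ≤ diff →
      finishA (maxRevLoopA diff (rest.length + 1) (front :: rest) men women |women - men|)
        = maxRevLoopB diff rest front men women ((rest.length : Int) + 1) := by
  intro rest
  induction rest with
  | nil =>
    intro front men women h
    rw [loopA_stop _ _ _ _ _ _ (by simp)]
    simp [finishA, maxRevLoopB]
  | cons d rest' ih =>
    intro front men women h
    have hfuel : (d :: rest').length + 1 - 1 = rest'.length + 1 := by simp
    have hrem : ((d :: rest').length : Int) + 1 - 1 = (rest'.length : Int) + 1 := by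
      push_cast [List.length_cons]; ring
    rw [maxRevLoopA, dif_pos ⟨by simp, h⟩]
    simp only [maxRevLoopB]
    rw [hfuel, hrem]
    by_cases h1 : men - women ≥ diff ∧ d = 'W'
    · simp only [if_pos h1]
      by_cases h2 : front = 'W'
      · simp only [if_pos h2]
        exact after_step diff rest' ih d men (women + 1)
      · simp only [if_neg h2]
        exact after_step diff rest' ih front men (women + 1)
    · simp only [if_neg h1]
      by_cases h2 : women - men ≥ diff ∧ d = 'M'
      · simp only [if_pos h2]
        by_cases h3 : front = 'M'
        · simp only [if_pos h3]
          exact after_step diff rest' ih d (men + 1) women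
        · simp only [if_neg h3]
          exact after_step diff rest' ih front (men + 1) women
      · simp only [if_neg h2]
        by_cases h3 : front = 'M'
        · simp only [if_pos h3]
          exact after_step diff rest' ih d (men + 1) women
        · simp only [if_neg h3]
          exact after_step diff rest' ih d men (women + 1)

-- ===== VERDICT (by name: the statement is the Claim_ definition above) =====
theorem max_revellers_spec : Claim_equal_max_revellers := by
  intro diff genders _ hpre
  obtain ⟨hge, hor⟩ := hpre
  unfold Spec_max_revellers max_revellers max_revellers_alt
  by_cases h0 : diff = 0
  · simp [h0]
  · rw [if_neg h0, if_neg h0]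
    have hne' : genders ≠ "" := hor.resolve_left h0
    have hlist : genders.toList ≠ [] := by
      intro hE
      exact hne' (by cases genders with | _ l => cases l <;> simp_all)
    obtain ⟨front, tail, hft⟩ := List.exists_cons_of_ne_nil hlist
    rw [hft]
    have h00 : |(0 : Int) - 0| ≤ diff := by simpa using hge
    have key := loop_eq diff tail front 0 0 h00
    rw [show |(0 : Int) - 0| = 0 from by norm_num] at key
    simp only [List.length_cons]
    rw [show ((tail.length + 1 : Nat) : Int) = (tail.length : Int) + 1 from by push_cast; ring]
    rw [← key]
    simp [finishA]
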